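-- pv_equiv track=rewrite | github.com/haibarassm/git-weekly-report | src/app.py | _restore_project_branch_info
-- ===== SOURCE A (Python) =====
-- def _restore_project_branch_info(processed_commits: list, original_commits: list) -> list:
--     """
--     恢复处理后的 commit 的项目和分支信息
--     根据 source_commit (hash) 匹配原始 commit 的 project 和 branch
--     """
--     # 创建 hash -> (project, branch, date) 的映射
--     commit_info = {}
--     for commit in original_commits:
--         commit_info[commit['hash']] = {
--             'project': commit.get('project', ''),
--             'branch': commit.get('branch', ''),
--             'date': commit.get('date', '')
--         }
--
--     # 恢复信息
--     for commit in processed_commits: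
--         source_hash = commit.get('source_commit', '')
--         if source_hash in commit_info:
--             commit['project'] = commit_info[source_hash]['project']
--             commit['branch'] = commit_info[source_hash]['branch']
--             commit['date'] = commit_info[source_hash]['date']
--
--     return processed_commits
-- ===== SOURCE B (Python) =====
-- def _restore_project_branch_info(processed_commits: list, original_commits: list) -> list:
--     """Per-commit reverse scan over original_commits instead of a precomputed
--     hash->info dictionary; last duplicate hash wins, just like dict insertion."""
--     for commit in processed_commits:
--         source_hash = commit.get('source_commit', '')
--         for original in reversed(original_commits):
--             if original['hash'] == source_hash:
--                 commit['project'] = original.get('project', '')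
--                 commit['branch'] = original.get('branch', '')
--                 commit['date'] = original.get('date', '')
--                 break
--     return processed_commits
-- ===== Notes on version B (the rewrite author's own statement) =====
-- stated objective: alternative
-- what changed: Drops A's precomputed hash->info dictionary; B scans original_commits in reverse for each processed commit and copies the fields from the first (i.e. last-in-order) hash match, trading the index for a direct scan.
-- outside the precondition, e.g. on _restore_project_branch_info([], [{'project': 'P'}]): A raises KeyError, B returns []
import Mathlib
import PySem

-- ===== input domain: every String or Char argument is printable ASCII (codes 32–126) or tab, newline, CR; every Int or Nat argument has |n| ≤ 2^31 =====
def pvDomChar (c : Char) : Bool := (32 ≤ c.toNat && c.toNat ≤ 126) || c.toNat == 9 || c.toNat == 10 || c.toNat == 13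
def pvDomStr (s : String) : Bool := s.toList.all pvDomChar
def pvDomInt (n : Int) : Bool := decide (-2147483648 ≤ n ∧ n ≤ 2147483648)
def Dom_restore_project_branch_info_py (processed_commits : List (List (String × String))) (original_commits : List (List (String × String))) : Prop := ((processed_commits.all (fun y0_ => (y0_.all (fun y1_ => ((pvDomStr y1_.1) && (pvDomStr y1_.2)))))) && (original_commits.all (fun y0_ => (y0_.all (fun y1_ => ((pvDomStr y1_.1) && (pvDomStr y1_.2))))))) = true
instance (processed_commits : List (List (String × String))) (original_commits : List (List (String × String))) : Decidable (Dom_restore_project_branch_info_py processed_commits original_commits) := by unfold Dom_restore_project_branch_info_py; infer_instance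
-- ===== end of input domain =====

-- B replaces A's precomputed hash->info dictionary by a per-commit reverse scan of
-- original_commits (alternative decomposition, same return value); both versions mutate
-- the processed commits in place in Python — the equivalence proved is about the return value.

-- commits are Python dicts, encoded as association lists (lookup = first match):
-- d.get(k) / d.get(k, dflt) / d[k] = v (overwrite in place, else append)
def lget (c : List (String × String)) (k : String) : Option String :=
  (c.find? (fun p => p.1 == k)).map (·.2)

def lgetD (c : List (String × String)) (k dflt : String) : String :=
  (lget c k).getD dflt

def lset : List (String × String) → String → String → List (String × String)
  | [], k, v => [(k, v)]
  | (k', v') :: rest, k, v =>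
      if k' == k then (k', v) :: rest else (k', v') :: lset rest k v

-- ===== PORT A =====
def restore_project_branch_info_py (processed_commits : List (List (String × String))) (original_commits : List (List (String × String))) : List (List (String × String)) :=
  -- commit_info = {} ; for commit in original_commits: commit_info[commit['hash']] = {...}
  let commit_info : PySem.Dict String (String × String × String) :=
    original_commits.foldl (fun d c =>
      match lget c "hash" with
      | some h => d.insert h (lgetD c "project" "", lgetD c "branch" "", lgetD c "date" "")
      | none => d)   -- commit['hash'] raises KeyError in Python here; excluded by Pre_
      PySem.Dict.empty
  -- for commit in processed_commits: … (in-place updates rendered as a map)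
  processed_commits.map (fun c =>
    let source_hash := lgetD c "source_commit" ""
    match commit_info.get? source_hash with
    | some (pr, br, dt) => lset (lset (lset c "project" pr) "branch" br) "date" dt
    | none => c)

-- ===== PORT B =====
def restore_project_branch_info_py_alt (processed_commits : List (List (String × String))) (original_commits : List (List (String × String))) : List (List (String × String)) :=
  processed_commits.map (fun c =>
    let source_hash := lgetD c "source_commit" ""
    -- for original in reversed(original_commits): if original.get('hash') == source_hash: …; break
    match original_commits.reverse.find? (fun oc => lget oc "hash" == some source_hash) with
    | some oc =>
        lset (lset (lset c "project" (lgetD oc "project" ""))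
                   "branch" (lgetD oc "branch" ""))
             "date" (lgetD oc "date" "")
    | none => c)

-- ===== PRECONDITION & SPEC =====
-- Pre_ excludes inputs where some original commit lacks the 'hash' key: there the Python A
-- raises KeyError at commit['hash'] and returns nothing.
def Pre_restore_project_branch_info_py (processed_commits : List (List (String × String))) (original_commits : List (List (String × String))) : Prop :=
  original_commits.all (fun c => (lget c "hash").isSome) = true
instance (processed_commits : List (List (String × String))) (original_commits : List (List (String × String))) : Decidable (Pre_restore_project_branch_info_py processed_commits original_commits) := by unfold Pre_restore_project_branch_info_py; infer_instance

def pvWitness_restore_project_branch_info_py : (List (List (String × String))) × (List (List (String × String))) :=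
  ([[("source_commit", "a")], [("source_commit", "b"), ("branch", "old")]],
   [[("hash", "a"), ("project", "P"), ("date", "D")], [("hash", "a"), ("project", "Q")]])

def Spec_restore_project_branch_info_py (processed_commits : List (List (String × String))) (original_commits : List (List (String × String))) (out : List (List (String × String))) : Prop := out = restore_project_branch_info_py_alt processed_commits original_commits
instance (processed_commits : List (List (String × String))) (original_commits : List (List (String × String))) (out : List (List (String × String))) : Decidable (Spec_restore_project_branch_info_py processed_commits original_commits out) := by unfold Spec_restore_project_branch_info_py; infer_instance

-- ===== CLAIM (what is proved, stated in full; the proofs are below) =====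
def Claim_equal_restore_project_branch_info_py : Prop := ∀ (processed_commits : List (List (String × String))) (original_commits : List (List (String × String))), Dom_restore_project_branch_info_py processed_commits original_commits → Pre_restore_project_branch_info_py processed_commits original_commits → Spec_restore_project_branch_info_py processed_commits original_commits (restore_project_branch_info_py processed_commits original_commits)

-- ===== LEMMAS AND PROOFS =====

-- A's dictionary lookup equals B's reverse-scan: last insertion for a hash wins,
-- which is exactly the first match in the reversed list.
theorem foldl_insert_get_eq_reverse_find (h : String)
    (o : List (List (String × String))) (d : PySem.Dict String (String × String × String))
    (hp : ∀ c ∈ o, (lget c "hash").isSome = true) :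
    (o.foldl (fun d c =>
      match lget c "hash" with
      | some k => d.insert k (lgetD c "project" "", lgetD c "branch" "", lgetD c "date" "")
      | none => d) d).get? h
    = match o.reverse.find? (fun oc => lget oc "hash" == some h) with
      | some oc => some (lgetD oc "project" "", lgetD oc "branch" "", lgetD oc "date" "")
      | none => d.get? h := by
  induction o generalizing d with
  | nil => simp
  | cons c rest ih =>
    have hc : (lget c "hash").isSome = true := hp c (by simp)
    obtain ⟨k, hk⟩ := Option.isSome_iff_exists.mp hc
    have hrest : ∀ c' ∈ rest, (lget c' "hash").isSome = true := fun c' hm => hp c' (by simp [hm])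
    simp only [List.foldl_cons, List.reverse_cons, List.find?_append, hk]
    rw [ih _ hrest]
    cases hfind : rest.reverse.find? (fun oc => lget oc "hash" == some h) with
    | some oc => simp
    | none =>
      simp only [Option.none_or, List.find?_cons, List.find?_nil, hk]
      by_cases hkh : k = h
      · subst hkh
        simp [PySem.Dict.get?_insert_self]
      · rw [PySem.Dict.get?_insert_of_ne d _ (Ne.symm hkh)]
        simp [beq_eq_false_iff_ne.mpr hkh]

-- ===== VERDICT (by name: the statement is the Claim_ definition above) =====
theorem restore_project_branch_info_py_spec : Claim_equal_restore_project_branch_info_py := by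
  intro p o _hdom hpre
  unfold Spec_restore_project_branch_info_py
  unfold restore_project_branch_info_py restore_project_branch_info_py_alt
  have hp : ∀ c ∈ o, (lget c "hash").isSome = true := by
    simpa [Pre_restore_project_branch_info_py, List.all_eq_true] using hpre
  refine List.map_congr_left (fun c _ => ?_)
  simp only
  rw [foldl_insert_get_eq_reverse_find (lgetD c "source_commit" "") o PySem.Dict.empty hp]
  cases o.reverse.find? (fun oc => lget oc "hash" == some (lgetD c "source_commit" "")) with
  | some oc => rfl
  | none => simp
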